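-- pv_equiv track=rewrite | github.com/mi3nts/btl433EspecChamber | animation.py | symmetrical_converging_range
-- ===== SOURCE A (Python) =====
-- def symmetrical_converging_range(values):
--     result = []
--     left = 0
--     right = len(values) - 1
--     while left <= right:
--         if right != left:
--             result.append(values[right])
--         result.append(values[left])
--         left += 1
--         right -= 1
--     return result
-- ===== SOURCE B (Python) =====
-- def symmetrical_converging_range(values):
--     n = len(values)
--     k = (n + 1) // 2
--     lefts = values[:k]
--     rights = values[k:][::-1]
--     result = [x for pair in zip(rights, lefts) for x in pair]
--     if len(lefts) > len(rights):
--         result.append(lefts[-1])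
--     return result
-- ===== Notes on version B (the rewrite author's own statement) =====
-- stated objective: alternative
-- what changed: B splits the list into the bottom half and the reversed top half up front and interleaves them with a single zip pass (appending the odd middle leftover once), instead of A's converging two-pointer loop with a per-step left==right branch.
import Mathlib
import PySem

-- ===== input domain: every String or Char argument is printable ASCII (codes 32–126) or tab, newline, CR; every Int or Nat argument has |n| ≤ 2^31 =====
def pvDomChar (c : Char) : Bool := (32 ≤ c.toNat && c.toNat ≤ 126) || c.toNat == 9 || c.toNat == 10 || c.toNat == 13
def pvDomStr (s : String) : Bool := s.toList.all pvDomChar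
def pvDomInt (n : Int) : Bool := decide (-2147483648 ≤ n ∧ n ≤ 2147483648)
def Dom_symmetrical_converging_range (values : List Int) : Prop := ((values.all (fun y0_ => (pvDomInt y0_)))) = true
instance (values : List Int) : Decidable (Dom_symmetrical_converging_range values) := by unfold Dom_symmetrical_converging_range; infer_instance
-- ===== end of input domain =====

-- B forms the two halves first (bottom half, reversed top half) and interleaves them in one
-- zip pass, instead of A's two-pointer convergence with a per-step equality branch (objective: alternative).

-- ===== PORT A =====
-- the loop reads values[left]/values[right] only when 0 ≤ left ≤ right < values.length,
-- so the total pyGetD (default 0) is exact here; A raises on no input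
def symLoopA (values : List Int) (left right : Int) (result : List Int) : List Int :=
  if left ≤ right then
    let result := if right ≠ left then result ++ [PySem.List.pyGetD values right 0] else result
    symLoopA values (left + 1) (right - 1) (result ++ [PySem.List.pyGetD values left 0])
  else result
termination_by (right + 1 - left).toNat
decreasing_by omega

def symmetrical_converging_range (values : List Int) : List Int :=
  symLoopA values 0 ((values.length : Int) - 1) []

-- ===== PORT B =====
-- lefts is nonempty in the branch that reads lefts[-1], so the total pyGetD (default 0) is exact
def symmetrical_converging_range_alt (values : List Int) : List Int :=
  let n : Int := values.length
  let k : Int := PySem.Int.floordiv (n + 1) 2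
  let lefts := PySem.List.slice values none (some k)
  let rights := (PySem.List.slice values (some k) none).reverse
  let result := (rights.zip lefts).flatMap (fun p => [p.1, p.2])
  if lefts.length > rights.length then result ++ [PySem.List.pyGetD lefts (-1) 0]
  else result

-- ===== PRECONDITION & SPEC =====
def Spec_symmetrical_converging_range (values : List Int) (out : List Int) : Prop := out = symmetrical_converging_range_alt values
instance (values : List Int) (out : List Int) : Decidable (Spec_symmetrical_converging_range values out) := by unfold Spec_symmetrical_converging_range; infer_instance

-- ===== CLAIM (what is proved, stated in full; the proofs are below) =====
def Claim_equal_symmetrical_converging_range : Prop := ∀ (values : List Int), Dom_symmetrical_converging_range values → Spec_symmetrical_converging_range values (symmetrical_converging_range values)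

-- ===== LEMMAS AND PROOFS =====

-- reference "converge from the ends" function both ports are reduced to
def gSym : List Int → List Int
  | [] => []
  | [x] => [x]
  | x :: y :: rest => ((y :: rest).getLast (by simp)) :: x :: gSym ((y :: rest).dropLast)
termination_by xs => xs.length
decreasing_by simp

lemma gSym_peel (x z : Int) (mid : List Int) :
    gSym (x :: (mid ++ [z])) = z :: x :: gSym mid := by
  cases mid with
  | nil => simp [gSym]
  | cons y rest =>
    have h : x :: ((y :: rest) ++ [z]) = x :: y :: (rest ++ [z]) := by simp
    rw [h, gSym]
    have hl : (y :: (rest ++ [z])).getLast (by simp) = z := by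
      simp
    have hd : (y :: (rest ++ [z])).dropLast = y :: rest := by
      simpa using List.dropLast_concat (l₁ := y :: rest) (b := z)
    rw [hd, hl]

lemma gSym_two (w : List Int) (h : 2 ≤ w.length) :
    gSym w = (w.getLast (by intro he; simp [he] at h)) :: (w.head (by intro he; simp [he] at h)) :: gSym w.tail.dropLast := by
  match w, h with
  | x :: y :: rest, _ =>
    rw [gSym]
    simp [List.getLast_cons]

lemma pyGetD_idx (values : List Int) (L : Nat) (h : L < values.length) :
    PySem.List.pyGetD values (L : Int) 0 = values[L] := by
  simp [PySem.List.pyGetD_natCast, List.getD_eq_getElem?_getD, h]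

-- the A-side loop on window [L, L+m) appends gSym of that window
lemma symLoopA_window (m : Nat) : ∀ (values : List Int) (L : Nat) (res : List Int),
    L + m ≤ values.length →
    symLoopA values (L : Int) ((L : Int) + (m : Int) - 1) res
      = res ++ gSym ((values.drop L).take m) := by
  induction m using Nat.strong_induction_on with
  | _ m IH =>
  intro values L res hle
  match m with
  | 0 =>
    rw [symLoopA, if_neg (by push_cast; omega)]
    simp [gSym]
  | 1 =>
    have hL : L < values.length := by omega
    rw [symLoopA, if_pos (by push_cast; omega)]
    simp only
    rw [if_neg (by push_cast; omega)]
    rw [symLoopA, if_neg (by push_cast; omega)]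
    have hw : List.take 1 (values.drop L) = [values[L]] := by
      show List.take (0+1) (values.drop L) = _
      rw [List.drop_eq_getElem_cons hL, List.take_succ_cons, List.take_zero]
    rw [hw, pyGetD_idx values L hL]
    simp [gSym]
  | (m+2) =>
    have hR : L + m + 1 < values.length := by omega
    have hL : L < values.length := by omega
    rw [symLoopA, if_pos (by push_cast; omega)]
    simp only
    rw [if_pos (by push_cast; omega)]
    have e1 : ((L : Int) + 1) = ((L + 1 : Nat) : Int) := by push_cast; ring
    have e2 : ((L : Int) + ((m+2 : Nat) : Int) - 1 - 1) = (((L+1 : Nat)) : Int) + ((m : Nat) : Int) - 1 := by push_cast; ring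
    rw [e1, e2, IH m (by omega) values (L+1) _ (by omega)]
    have eR : ((L : Int) + ((m+2 : Nat) : Int) - 1) = (((L + m + 1 : Nat)) : Int) := by push_cast; ring
    rw [eR, pyGetD_idx values (L+m+1) hR, pyGetD_idx values L hL]
    have hwlen : ((values.drop L).take (m+2)).length = m + 2 := by
      simp [List.length_take, List.length_drop]; omega
    have hlast : ∀ h, ((values.drop L).take (m+2)).getLast h = values[L+m+1] := by
      intro h
      rw [List.getLast_eq_getElem]
      rw [List.getElem_take, List.getElem_drop]
      congr 1
      omega
    have hhead : ∀ h, ((values.drop L).take (m+2)).head h = values[L] := by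
      intro h
      rw [List.head_eq_getElem]
      rw [List.getElem_take, List.getElem_drop]
      simp
    have htd : ((values.drop L).take (m+2)).tail.dropLast = (values.drop (L+1)).take m := by
      have h1 : ((values.drop L).take (m+2)).tail = (values.drop (L+1)).take (m+1) := by
        rw [← List.drop_one, List.drop_take, List.drop_drop]
        norm_num
      have h2 : ((values.drop (L+1)).take (m+1)).length = m+1 := by
        simp [List.length_take, List.length_drop]; omega
      rw [h1, List.dropLast_eq_take, h2, List.take_take]
      have hmin : min (m+1-1) (m+1) = m := by omega
      rw [hmin]
    rw [gSym_two (List.take (m+2) (values.drop L)) (by rw [hwlen]; omega), hlast, hhead, htd]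
    simp

lemma pyGetD_neg_one (l : List Int) (h : l ≠ []) (d : Int) :
    PySem.List.pyGetD l (-1) d = l.getLast h := by
  have hn : 0 < l.length := List.length_pos_iff.mpr h
  simp only [PySem.List.pyGetD, PySem.List.pyGet?, PySem.List.pyIdx?]
  rw [if_neg (by omega), if_pos (by omega)]
  have h1 : (-(-1 : Int)).toNat = 1 := by decide
  rw [h1]
  simp only [Option.bind_some]
  rw [List.getElem?_eq_getElem (by omega)]
  simp [List.getLast_eq_getElem]

-- B's port with the floor-division split point named explicitly
lemma alt_unfold (values : List Int) (k' : Nat)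
    (hk : PySem.Int.floordiv ((values.length : Int) + 1) 2 = (k' : Int)) :
    symmetrical_converging_range_alt values =
      (if (values.take k').length > ((values.drop k').reverse).length
       then (((values.drop k').reverse.zip (values.take k')).flatMap (fun p => [p.1, p.2]))
              ++ [PySem.List.pyGetD (values.take k') (-1) 0]
       else ((values.drop k').reverse.zip (values.take k')).flatMap (fun p => [p.1, p.2])) := by
  unfold symmetrical_converging_range_alt
  simp only [hk, PySem.List.slice_to_natCast, PySem.List.slice_from_natCast]

lemma alt_peel (x z : Int) (mid : List Int) :
    symmetrical_converging_range_alt (x :: (mid ++ [z])) = z :: x :: symmetrical_converging_range_alt mid := by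
  have hk1 : PySem.Int.floordiv (((x :: (mid ++ [z])).length : Int) + 1) 2
      = (((mid.length+1)/2 + 1 : Nat) : Int) := by
    have hlen : (x :: (mid ++ [z])).length = mid.length + 2 := by simp
    rw [hlen]
    have hc : ((mid.length+2 : Nat) : Int) + 1 = ((mid.length+3 : Nat) : Int) := by push_cast; ring
    rw [hc]
    calc PySem.Int.floordiv ((mid.length+3 : Nat) : Int) 2 = (((mid.length+3)/2 : Nat) : Int) := by
          exact_mod_cast PySem.Int.floordiv_natCast (mid.length+3) 2
      _ = (((mid.length+1)/2 + 1 : Nat) : Int) := by congr 1; omega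
  have hk2 : PySem.Int.floordiv ((mid.length : Int) + 1) 2 = (((mid.length+1)/2 : Nat) : Int) := by
    have hc : ((mid.length : Nat) : Int) + 1 = ((mid.length+1 : Nat) : Int) := by push_cast; ring
    rw [hc]
    exact_mod_cast PySem.Int.floordiv_natCast (mid.length+1) 2
  rw [alt_unfold _ _ hk1, alt_unfold _ _ hk2]
  have hk'le : (mid.length+1)/2 ≤ mid.length := by omega
  have htake : (x :: (mid ++ [z])).take ((mid.length+1)/2 + 1) = x :: mid.take ((mid.length+1)/2) := by
    rw [List.take_succ_cons, List.take_append_of_le_length hk'le]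
  have hdrop : (x :: (mid ++ [z])).drop ((mid.length+1)/2 + 1) = mid.drop ((mid.length+1)/2) ++ [z] := by
    rw [List.drop_succ_cons, List.drop_append_of_le_length hk'le]
  rw [htake, hdrop, List.reverse_append]
  simp only [List.reverse_cons, List.reverse_nil, List.nil_append, List.singleton_append,
    List.zip_cons_cons, List.flatMap_cons]
  have hL : (mid.take ((mid.length+1)/2)).length = (mid.length+1)/2 := by
    simp [List.length_take]; omega
  have hR : ((mid.drop ((mid.length+1)/2)).reverse).length = mid.length - (mid.length+1)/2 := by
    simp [List.length_drop]
  by_cases hc : (mid.take ((mid.length+1)/2)).length > ((mid.drop ((mid.length+1)/2)).reverse).length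
  · rw [if_pos (by simp [List.length_cons]; omega), if_pos hc]
    have hc' : (mid.length+1)/2 > mid.length - (mid.length+1)/2 := by rw [hL, hR] at hc; exact hc
    have hLne : mid.take ((mid.length+1)/2) ≠ [] := by
      intro he
      have h0 := congrArg List.length he
      rw [hL] at h0
      simp only [List.length_nil] at h0
      omega
    rw [pyGetD_neg_one (x :: mid.take ((mid.length+1)/2)) (by simp) 0,
        pyGetD_neg_one (mid.take ((mid.length+1)/2)) hLne 0,
        List.getLast_cons hLne]
    simp
  · rw [if_neg (by simp [List.length_cons]; omega), if_neg hc]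
    simp

lemma alt_eq_gSym_aux : ∀ (n : Nat) (xs : List Int), xs.length = n →
    symmetrical_converging_range_alt xs = gSym xs := by
  intro n
  induction n using Nat.strong_induction_on with
  | _ n IH =>
  intro xs hlen
  match xs with
  | [] =>
    rw [alt_unfold [] 0 (by decide)]
    simp [gSym]
  | [x] =>
    have h1 : PySem.Int.floordiv ((([x] : List Int).length : Int) + 1) 2 = ((1:Nat) : Int) := by
      have hx : (([x] : List Int).length : Int) = 1 := by simp
      rw [hx]
      decide
    rw [alt_unfold [x] 1 h1]
    simp [gSym, PySem.List.pyGetD, PySem.List.pyGet?, PySem.List.pyIdx?]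
  | x :: y :: rest =>
    have hxz : x :: y :: rest = x :: ((y :: rest).dropLast ++ [(y :: rest).getLast (by simp)]) := by
      rw [List.dropLast_append_getLast]
    rw [hxz, alt_peel, gSym_peel]
    have hmlt : ((y :: rest).dropLast).length < n := by
      simp at hlen ⊢
      omega
    rw [IH _ hmlt _ rfl]

-- ===== VERDICT (by name: the statement is the Claim_ definition above) =====
theorem symmetrical_converging_range_spec : Claim_equal_symmetrical_converging_range := by
  intro values _
  unfold Spec_symmetrical_converging_range symmetrical_converging_range
  rw [alt_eq_gSym_aux values.length values rfl]
  have h := symLoopA_window values.length values 0 [] (by omega)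
  simpa using h
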